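-- pv_equiv track=rewrite | github.com/LQjing51/Kernel-App | inst_scan/C6_C7指令分类/NonImplement.py | onlyOneSemicolon
-- ===== SOURCE A (Python) =====
-- def onlyOneSemicolon(context):
--     count  = 0
--     pos = -1
--     for i in range(0,len(context)):
--         if context[i] == ';':
--             count = count+1
--             pos = i
--             if count > 1:
--                 return -1
--     return pos
-- ===== SOURCE B (Python) =====
-- def onlyOneSemicolon(context):
--     return context.find(';') if context.count(';') == 1 else -1
-- ===== Notes on version B (the rewrite author's own statement) =====
-- stated objective: simpler
-- what changed: Replaces the manual indexed loop with running count/pos state and early exit by a one-line count-then-locate pair of library scans (str.count + str.find).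
import Mathlib
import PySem

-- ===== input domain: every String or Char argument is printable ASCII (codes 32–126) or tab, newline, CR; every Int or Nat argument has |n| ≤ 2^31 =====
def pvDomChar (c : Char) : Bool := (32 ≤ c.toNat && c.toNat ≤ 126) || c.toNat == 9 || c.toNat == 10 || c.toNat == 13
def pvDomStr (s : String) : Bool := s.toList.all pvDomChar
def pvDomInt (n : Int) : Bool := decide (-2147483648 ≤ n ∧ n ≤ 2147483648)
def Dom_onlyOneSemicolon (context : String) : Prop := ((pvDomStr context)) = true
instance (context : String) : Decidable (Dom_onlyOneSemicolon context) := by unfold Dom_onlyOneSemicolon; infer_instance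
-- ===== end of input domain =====

-- B replaces A's manual indexed loop (count/pos state, early exit) with a count-then-locate pair of library scans; same behaviour, simpler.


-- ===== PORT A =====
-- the for-loop over range(0, len(context)) with state (count, pos) and early 'return -1'
def onlyOneSemicolonGo : List Char → Int → Int → Int → Int
  | [], _, _, pos => pos
  | ch :: rest, i, count, pos =>
    if ch = ';' then
      if count + 1 > 1 then -1
      else onlyOneSemicolonGo rest (i + 1) (count + 1) i
    else onlyOneSemicolonGo rest (i + 1) count pos

def onlyOneSemicolon (context : String) : Int :=
  onlyOneSemicolonGo context.toList 0 0 (-1)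

-- ===== PORT B =====
def onlyOneSemicolon_alt (context : String) : Int :=
  if PySem.Str.count context ";" == 1 then PySem.Str.find context ";" else -1

-- ===== PRECONDITION & SPEC =====
def Spec_onlyOneSemicolon (context : String) (out : Int) : Prop := out = onlyOneSemicolon_alt context
instance (context : String) (out : Int) : Decidable (Spec_onlyOneSemicolon context out) := by unfold Spec_onlyOneSemicolon; infer_instance

-- ===== CLAIM (what is proved, stated in full; the proofs are below) =====
def Claim_equal_onlyOneSemicolon : Prop := ∀ (context : String), Dom_onlyOneSemicolon context → Spec_onlyOneSemicolon context (onlyOneSemicolon context)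

-- ===== LEMMAS AND PROOFS =====

-- Chars.count with a single-character needle is List.count
theorem countGo_singleton (c : Char) :
    ∀ (fuel : Nat) (l : List Char) (acc : Nat), l.length ≤ fuel →
      PySem.Chars.count.go [c] fuel l acc = acc + l.count c := by
  intro fuel
  induction fuel with
  | zero =>
    intro l acc h
    cases l with
    | nil => simp [PySem.Chars.count.go]
    | cons a t => simp at h
  | succ n ih =>
    intro l acc h
    cases l with
    | nil => simp [PySem.Chars.count.go]
    | cons a t =>
      simp only [List.length_cons, Nat.succ_le_succ_iff] at h
      by_cases hc : a = c
      · subst hc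
        simp [PySem.Chars.count.go, List.isPrefixOf, ih t (acc + 1) h]
        omega
      · simp [PySem.Chars.count.go, List.isPrefixOf, hc, ih t acc h, Ne.symm hc]

theorem count_singleton (l : List Char) (c : Char) :
    PySem.Chars.count l [c] = l.count c := by
  simpa using countGo_singleton c l.length l 0 le_rfl

-- Chars.find with a single-character needle is idxOf (or -1)
theorem findGo_singleton (c : Char) :
    ∀ (l : List Char) (k : Nat),
      PySem.Chars.find.go [c] l k = if c ∈ l then ((k : Int) + l.idxOf c) else -1 := by
  intro l
  induction l with
  | nil => intro k; simp [PySem.Chars.find.go]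
  | cons a t ih =>
    intro k
    by_cases hc : a = c
    · subst hc
      simp [PySem.Chars.find.go, List.isPrefixOf, List.idxOf_cons_self]
    · have h2 := ih (k + 1)
      simp only [PySem.Chars.find.go, List.isPrefixOf, List.mem_cons]
      simp only [List.all_nil, Bool.and_true]
      simp [h2, Ne.symm hc, List.idxOf_cons_ne t hc]
      split_ifs with hm
      · ring
      · rfl

theorem find_singleton (l : List Char) (c : Char) :
    PySem.Chars.find l [c] = if c ∈ l then (l.idxOf c : Int) else -1 := by
  have := findGo_singleton c l 0
  simpa [PySem.Chars.find] using this

-- characterisation of A's loop once a first ';' has been seen (count = 1)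
theorem goA_one (l : List Char) :
    ∀ (i pos : Int), onlyOneSemicolonGo l i 1 pos =
      if l.count ';' = 0 then pos else -1 := by
  induction l with
  | nil => intro i pos; simp [onlyOneSemicolonGo]
  | cons a t ih =>
    intro i pos
    by_cases hc : a = ';'
    · subst hc
      simp [onlyOneSemicolonGo]
    · simp [onlyOneSemicolonGo, hc, ih, List.count_cons]

-- characterisation of A's loop from the initial state (count = 0, pos = -1)
theorem goA_zero (l : List Char) :
    ∀ (i : Nat), onlyOneSemicolonGo l i 0 (-1) =
      if l.count ';' = 0 then -1
      else if l.count ';' = 1 then ((i : Int) + l.idxOf ';') else -1 := by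
  induction l with
  | nil => intro i; simp [onlyOneSemicolonGo]
  | cons a t ih =>
    intro i
    by_cases hc : a = ';'
    · subst hc
      have h1 := goA_one t ((i : Int) + 1) (i : Int)
      by_cases h0 : t.count ';' = 0
      · simp [onlyOneSemicolonGo, h1, h0, List.idxOf_cons_self]
      · simp [onlyOneSemicolonGo, h1, h0]
    · have h2 := ih (i + 1)
      have hcnt : (a :: t).count ';' = t.count ';' := by
        simp [List.count_cons, hc]
      have hidx : (a :: t).idxOf ';' = t.idxOf ';' + 1 := by
        rw [List.idxOf_cons_ne t hc]
      simp only [onlyOneSemicolonGo, if_neg hc]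
      rw [show ((i : Int) + 1) = ((i + 1 : Nat) : Int) by push_cast; ring, h2, hcnt, hidx]
      split_ifs <;> push_cast <;> omega

-- ===== VERDICT (by name: the statement is the Claim_ definition above) =====
theorem onlyOneSemicolon_spec : Claim_equal_onlyOneSemicolon := by
  intro context _
  unfold Spec_onlyOneSemicolon onlyOneSemicolon onlyOneSemicolon_alt
  have hA := goA_zero context.toList 0
  norm_num at hA
  have hc : PySem.Str.count context ";" = context.toList.count ';' := by
    rw [PySem.Str.count_eq]
    exact count_singleton context.toList ';'
  have hf : PySem.Str.find context ";" =
      if ';' ∈ context.toList then (context.toList.idxOf ';' : Int) else -1 := by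
    rw [PySem.Str.find_eq]
    exact find_singleton context.toList ';'
  rw [hA, hc, hf]
  by_cases h0 : context.toList.count ';' = 0
  · simp [h0]
  · by_cases h1 : context.toList.count ';' = 1
    · have hm : ';' ∈ context.toList := by
        by_contra hn
        exact h0 (List.count_eq_zero.mpr hn)
      simp [h1, hm]
    · simp [h0, h1]
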